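-- pv_equiv track=rewrite | github.com/fai9al506/0dtealpha | tmp_filter_comparison.py | max_streak
-- ===== SOURCE A (Python) =====
-- def max_streak(tlist, result_type):
--     streak = 0
--     max_s = 0
--     for t in sorted(tlist, key=lambda x: x['time']):
--         if t['result'] == result_type:
--             streak += 1
--             if streak > max_s:
--                 max_s = streak
--         else:
--             streak = 0
--     return max_s
-- ===== SOURCE B (Python) =====
-- def max_streak(tlist, result_type):
--     flags = [t['result'] == result_type for t in sorted(tlist, key=lambda x: x['time'])]
--     breaks = [-1] + [i for i, f in enumerate(flags) if not f] + [len(flags)]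
--     return max(b - a - 1 for a, b in zip(breaks, breaks[1:]))
-- ===== Notes on version B (the rewrite author's own statement) =====
-- stated objective: alternative
-- what changed: A's single pass with a running streak/max accumulator is replaced by a segment decomposition: collect the positions of non-matching entries (with sentinels) and return the maximum gap between consecutive break positions.
import Mathlib
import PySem

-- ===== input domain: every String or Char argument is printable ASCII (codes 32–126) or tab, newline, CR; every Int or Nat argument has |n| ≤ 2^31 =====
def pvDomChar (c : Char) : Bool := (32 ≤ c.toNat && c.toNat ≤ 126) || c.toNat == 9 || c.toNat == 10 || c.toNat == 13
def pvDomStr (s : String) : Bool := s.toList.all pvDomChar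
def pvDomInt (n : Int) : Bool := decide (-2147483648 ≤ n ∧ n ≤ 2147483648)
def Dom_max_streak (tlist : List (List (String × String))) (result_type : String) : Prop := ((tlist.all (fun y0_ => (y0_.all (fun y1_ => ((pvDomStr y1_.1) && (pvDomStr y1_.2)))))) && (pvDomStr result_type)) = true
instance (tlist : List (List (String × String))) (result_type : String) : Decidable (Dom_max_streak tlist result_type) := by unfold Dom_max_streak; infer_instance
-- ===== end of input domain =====

-- B replaces A's running streak/max accumulator by a segment computation: indices of
-- non-matching entries (plus sentinels) are collected and the answer is the maximum
-- gap between consecutive break positions; objective: alternative decomposition.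

-- ===== PORT A =====
def max_streak (tlist : List (List (String × String))) (result_type : String) : Int :=
  let s := PySem.List.sorted tlist (fun x => PySem.Dict.getD (PySem.Dict.mk x) "time" "") false
  (s.foldl (fun (p : Int × Int) t =>
      if PySem.Dict.getD (PySem.Dict.mk t) "result" "" == result_type then
        let streak := p.1 + 1
        (streak, if streak > p.2 then streak else p.2)
      else (0, p.2)) ((0 : Int), (0 : Int))).2

-- ===== PORT B =====
def max_streak_alt (tlist : List (List (String × String))) (result_type : String) : Int :=
  let flags := (PySem.List.sorted tlist (fun x => PySem.Dict.getD (PySem.Dict.mk x) "time" "") false).map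
      (fun t => PySem.Dict.getD (PySem.Dict.mk t) "result" "" == result_type)
  let breaks : List Int :=
    [-1] ++ ((PySem.List.enumerate flags).filter (fun p => !p.2)).map (·.1) ++ [(flags.length : Int)]
  -- max(generator) over the gaps; breaks always has ≥ 2 elements, so the .getD 0 is never used (totalization only)
  (PySem.List.max? ((breaks.zip (PySem.List.slice breaks (some 1) none)).map (fun p => p.2 - p.1 - 1)) (fun x => x)).getD 0

-- ===== PRECONDITION & SPEC =====
-- Pre_ excludes exactly the inputs on which A raises KeyError: an entry missing the 'time' or 'result' key.
def Pre_max_streak (tlist : List (List (String × String))) (result_type : String) : Prop :=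
  ∀ t ∈ tlist, (PySem.Dict.mk t).contains "time" = true ∧ (PySem.Dict.mk t).contains "result" = true
instance (tlist : List (List (String × String))) (result_type : String) : Decidable (Pre_max_streak tlist result_type) := by unfold Pre_max_streak; infer_instance
def pvWitness_max_streak : (List (List (String × String))) × String :=
  ([[("time", "1"), ("result", "w")], [("time", "0"), ("result", "l")]], "w")
def Spec_max_streak (tlist : List (List (String × String))) (result_type : String) (out : Int) : Prop := out = max_streak_alt tlist result_type
instance (tlist : List (List (String × String))) (result_type : String) (out : Int) : Decidable (Spec_max_streak tlist result_type out) := by unfold Spec_max_streak; infer_instance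

-- ===== CLAIM (what is proved, stated in full; the proofs are below) =====
def Claim_equal_max_streak : Prop := ∀ (tlist : List (List (String × String))) (result_type : String), Dom_max_streak tlist result_type → Pre_max_streak tlist result_type → Spec_max_streak tlist result_type (max_streak tlist result_type)

-- ===== LEMMAS AND PROOFS =====

-- A's loop body on the boolean 'this entry matches'
def pvStep (p : Int × Int) (b : Bool) : Int × Int :=
  if b then (p.1 + 1, if p.1 + 1 > p.2 then p.1 + 1 else p.2) else (0, p.2)

-- B's break positions / gap list, with a generalized origin s for the induction
def pvIdx (s : Int) (flags : List Bool) : List Int :=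
  ((PySem.List.enumerate flags s).filter (fun p => !p.2)).map (·.1)

def pvBreaks (s : Int) (flags : List Bool) : List Int :=
  (s - 1) :: (pvIdx s flags ++ [s + (flags.length : Int)])

def pvDeltas (l : List Int) : List Int := (l.zip l.tail).map (fun p => p.2 - p.1 - 1)

def pvGaps (s : Int) (flags : List Bool) : List Int := pvDeltas (pvBreaks s flags)

def pvBump (c : Int) : List Int → List Int
  | [] => []
  | x :: xs => (x + c) :: xs

def pvM (l : List Int) : Int := l.foldl max 0

theorem pvGaps_nil (s : Int) : pvGaps s [] = [0] := by
  simp [pvGaps, pvBreaks, pvIdx, pvDeltas, PySem.List.enumerate]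

theorem pvGaps_false (s : Int) (rest : List Bool) :
    pvGaps s (false :: rest) = 0 :: pvGaps (s + 1) rest := by
  have h : s + ((rest.length : Int) + 1) = (s + 1) + (rest.length : Int) := by ring
  simp [pvGaps, pvBreaks, pvIdx, pvDeltas, PySem.List.enumerate_cons, h]

theorem pvGaps_true (s : Int) (rest : List Bool) :
    pvGaps s (true :: rest) = pvBump 1 (pvGaps (s + 1) rest) := by
  obtain ⟨y, ys, hy⟩ : ∃ y ys, pvIdx (s + 1) rest ++ [(s + 1) + (rest.length : Int)] = y :: ys := by
    cases pvIdx (s + 1) rest with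
    | nil => exact ⟨_, _, rfl⟩
    | cons a l => exact ⟨_, _, rfl⟩
  have h1 : pvBreaks s (true :: rest) = (s - 1) :: y :: ys := by
    simp only [pvBreaks, pvIdx, PySem.List.enumerate_cons, List.filter_cons, Bool.not_true,
      List.length_cons]
    rw [← hy]
    simp only [pvIdx, List.cons.injEq]
    refine ⟨trivial, ?_⟩
    congr 2
    push_cast
    ring
  have h2 : pvBreaks (s + 1) rest = s :: y :: ys := by
    rw [pvBreaks, hy]
    congr 1
    ring
  have hd : ∀ (a b : Int) (t : List Int), pvDeltas (a :: b :: t) = (b - a - 1) :: pvDeltas (b :: t) :=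
    fun a b t => rfl
  simp only [pvGaps]
  rw [h1, h2, hd, hd]
  simp only [pvBump, List.cons.injEq]
  exact ⟨by ring, trivial⟩

theorem pvGaps_nonneg (flags : List Bool) : ∀ s : Int, ∀ x ∈ pvGaps s flags, 0 ≤ x := by
  induction flags with
  | nil => intro s x hx; rw [pvGaps_nil] at hx; simp at hx; omega
  | cons b rest ih =>
    intro s x hx
    cases b with
    | false =>
      rw [pvGaps_false] at hx
      rcases List.mem_cons.mp hx with h | h
      · omega
      · exact ih _ _ h
    | true =>
      rw [pvGaps_true] at hx
      cases hg : pvGaps (s + 1) rest with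
      | nil => rw [hg] at hx; simp [pvBump] at hx
      | cons y ys =>
        rw [hg] at hx
        rcases List.mem_cons.mp hx with h | h
        · have hy : 0 ≤ y := ih (s + 1) y (by rw [hg]; exact List.mem_cons_self)
          omega
        · exact ih (s + 1) x (by rw [hg]; exact List.mem_cons.mpr (Or.inr h))

theorem pvGaps_ne_nil (flags : List Bool) (s : Int) : pvGaps s flags ≠ [] := by
  cases flags with
  | nil => rw [pvGaps_nil]; simp
  | cons b rest =>
    cases b with
    | false => rw [pvGaps_false]; simp
    | true =>
      rw [pvGaps_true]
      cases hg : pvGaps (s + 1) rest with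
      | nil => exact absurd hg (pvGaps_ne_nil rest (s + 1))
      | cons y ys => simp [pvBump]

theorem pvFoldl_max_max (l : List Int) : ∀ a b : Int, l.foldl max (max a b) = max a (l.foldl max b) := by
  induction l with
  | nil => intro a b; rfl
  | cons c l ih =>
    intro a b
    simp only [List.foldl_cons]
    rw [max_assoc, ih]

theorem pvM_cons (x : Int) (g : List Int) : pvM (x :: g) = max x (pvM g) := by
  simp only [pvM, List.foldl_cons]
  rw [max_comm 0 x, pvFoldl_max_max]

theorem pvM_nonneg (l : List Int) : 0 ≤ pvM l := by
  have h := pvFoldl_max_max l 0 0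
  simp only [max_self] at h
  rw [pvM, h]
  exact le_max_left _ _

theorem pvBump_zero (l : List Int) : pvBump 0 l = l := by
  cases l <;> simp [pvBump]

theorem pvBump_bump (c d : Int) (l : List Int) : pvBump c (pvBump d l) = pvBump (c + d) l := by
  cases l with
  | nil => rfl
  | cons x xs => simp [pvBump]; ring

-- main invariant: A's fold over the match flags equals m ⊔ (max gap, first gap extended by the carried streak c)
theorem pvMain (flags : List Bool) : ∀ (s c m : Int), 0 ≤ c → c ≤ m →
    (flags.foldl pvStep (c, m)).2 = max m (pvM (pvBump c (pvGaps s flags))) := by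
  induction flags with
  | nil =>
    intro s c m hc hcm
    rw [pvGaps_nil]
    simp only [pvBump, pvM, List.foldl_nil, List.foldl_cons, zero_add]
    omega
  | cons b rest ih =>
    intro s c m hc hcm
    cases b with
    | false =>
      have hstep : pvStep (c, m) false = (0, m) := by simp [pvStep]
      rw [List.foldl_cons, hstep, ih (s + 1) 0 m le_rfl (le_trans hc hcm), pvGaps_false,
        pvBump_zero]
      cases hg : pvGaps (s + 1) rest with
      | nil => exact absurd hg (pvGaps_ne_nil rest (s + 1))
      | cons y ys =>
        simp only [pvBump, pvM_cons, zero_add]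
        omega
    | true =>
      have hstep : pvStep (c, m) true = (c + 1, max m (c + 1)) := by
        simp only [pvStep, if_true]
        congr 1
        omega
      rw [List.foldl_cons, hstep, ih (s + 1) (c + 1) (max m (c + 1)) (by omega) (le_max_right _ _),
        pvGaps_true, pvBump_bump]
      have hnn := pvGaps_nonneg rest (s + 1)
      cases hg : pvGaps (s + 1) rest with
      | nil => exact absurd hg (pvGaps_ne_nil rest (s + 1))
      | cons y ys =>
        have hy : 0 ≤ y := hnn y (by rw [hg]; exact List.mem_cons_self)
        simp only [pvBump, pvM_cons]
        omega

theorem pvMaxGetD (l : List Int) (hne : l ≠ []) (hnn : ∀ x ∈ l, 0 ≤ x) :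
    (PySem.List.max? l (fun x => x)).getD 0 = pvM l := by
  cases l with
  | nil => exact absurd rfl hne
  | cons x xs =>
    rw [PySem.List.max?_id_cons]
    simp only [Option.getD_some, pvM, List.foldl_cons]
    rw [max_eq_right (hnn x List.mem_cons_self)]

-- ===== VERDICT (by name: the statement is the Claim_ definition above) =====
theorem max_streak_spec : Claim_equal_max_streak := by
  intro tlist result_type _ _
  show max_streak tlist result_type = max_streak_alt tlist result_type
  simp only [max_streak, max_streak_alt]
  set s := PySem.List.sorted tlist (fun x => PySem.Dict.getD (PySem.Dict.mk x) "time" "") false with hs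
  set flags := s.map (fun t => PySem.Dict.getD (PySem.Dict.mk t) "result" "" == result_type) with hf
  have hA : (s.foldl (fun (p : Int × Int) t =>
      if PySem.Dict.getD (PySem.Dict.mk t) "result" "" == result_type then
        (p.1 + 1, if p.1 + 1 > p.2 then p.1 + 1 else p.2)
      else (0, p.2)) ((0 : Int), (0 : Int))) = flags.foldl pvStep ((0 : Int), (0 : Int)) := by
    rw [hf, List.foldl_map]
    rfl
  rw [hA, pvMain flags 0 0 0 le_rfl le_rfl]
  have hbr : ([-1] ++ ((PySem.List.enumerate flags).filter (fun p => !p.2)).map (·.1) ++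
      [(flags.length : Int)] : List Int) = pvBreaks 0 flags := by
    simp [pvBreaks, pvIdx]
  rw [PySem.List.slice_from_one, hbr]
  have hgaps : ((pvBreaks 0 flags).zip (pvBreaks 0 flags).tail).map (fun p => p.2 - p.1 - 1) =
      pvGaps 0 flags := rfl
  rw [hgaps, pvMaxGetD _ (pvGaps_ne_nil flags 0) (pvGaps_nonneg flags 0), pvBump_zero]
  have := pvM_nonneg (pvGaps 0 flags)
  omega
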